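-- pv_equiv track=rewrite | github.com/Kennedh/CodeWars | Simple Fun #160 Cut The Ropes.py | cut_the_ropes
-- ===== SOURCE A (Python) =====
-- def cut_the_ropes(arr):
--     ropes = sorted(arr)
--     result = []
--     while ropes:
--         result.append(len(ropes))
--         smallest = ropes[0]
--         ropes = [r - smallest for r in ropes if r > smallest]
--     return result
-- ===== SOURCE B (Python) =====
-- def cut_the_ropes(arr):
--     s = sorted(arr)
--     n = len(s)
--     out = []
--     prev = None
--     for i, v in enumerate(s):
--         if v != prev:
--             out.append(n - i)
--             prev = v
--     return out
-- ===== Notes on version B (the rewrite author's own statement) =====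
-- stated objective: faster
-- what changed: Replaces A's while-loop that rebuilds (filters and re-subtracts) the whole rope list once per distinct value with a single pass over the sorted list that emits n-i at each first occurrence of a new value.
import Mathlib
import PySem

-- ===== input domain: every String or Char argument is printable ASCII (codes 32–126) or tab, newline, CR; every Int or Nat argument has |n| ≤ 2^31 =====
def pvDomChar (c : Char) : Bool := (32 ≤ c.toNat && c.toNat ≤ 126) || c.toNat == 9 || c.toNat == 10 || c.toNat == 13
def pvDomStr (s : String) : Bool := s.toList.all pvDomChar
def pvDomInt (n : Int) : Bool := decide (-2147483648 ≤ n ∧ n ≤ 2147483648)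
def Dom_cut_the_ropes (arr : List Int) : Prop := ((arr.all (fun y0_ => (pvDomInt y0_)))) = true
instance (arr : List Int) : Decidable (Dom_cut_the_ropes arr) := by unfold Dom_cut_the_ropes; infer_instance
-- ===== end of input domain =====

-- B replaces A's per-distinct-value rebuild of the rope list by one pass over the sorted list (faster).

-- ===== PORT A =====
-- the while loop: append len(ropes), then ropes = [r - smallest for r in ropes if r > smallest]
def cut_the_ropes_go (ropes : List Int) : List Int :=
  match ropes with
  | [] => []
  | r :: rs =>
    ((r :: rs).length : Int) ::
      cut_the_ropes_go (((r :: rs).filter (fun x => decide (r < x))).map (fun x => x - r))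
termination_by ropes.length
decreasing_by
  simp only [List.filter_cons, decide_eq_true_eq, lt_irrefl, if_false, List.length_map,
    List.length_cons]
  exact Nat.lt_succ_of_le (List.length_filter_le _ _)

def cut_the_ropes (arr : List Int) : List Int :=
  cut_the_ropes_go (PySem.List.sorted arr (fun x => x) false)

-- ===== PORT B =====
def cut_the_ropes_alt (arr : List Int) : List Int :=
  let s := PySem.List.sorted arr (fun x => x) false
  let n : Int := s.length
  ((PySem.List.enumerate s 0).foldl
    (fun (st : Option Int × List Int) iv =>
      if some iv.2 ≠ st.1 then (some iv.2, st.2 ++ [n - iv.1]) else st)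
    (none, [])).2

-- ===== PRECONDITION & SPEC =====
def Spec_cut_the_ropes (arr : List Int) (out : List Int) : Prop := out = cut_the_ropes_alt arr
instance (arr : List Int) (out : List Int) : Decidable (Spec_cut_the_ropes arr out) := by unfold Spec_cut_the_ropes; infer_instance

-- ===== CLAIM (what is proved, stated in full; the proofs are below) =====
def Claim_equal_cut_the_ropes : Prop := ∀ (arr : List Int), Dom_cut_the_ropes arr → Spec_cut_the_ropes arr (cut_the_ropes arr)

-- ===== LEMMAS AND PROOFS =====

-- functional view of B's scan: at a first occurrence the appended value n - i is the suffix length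
def scanGo : List Int → Option Int → List Int
  | [], _ => []
  | v :: t, prev =>
    if some v ≠ prev then ((v :: t).length : Int) :: scanGo t (some v) else scanGo t (some v)

-- B's fold over enumerate equals scanGo (n - index = suffix length)
theorem foldl_enum_eq_scanGo (s : List Int) (n k : Int) (prev : Option Int) (acc : List Int)
    (hn : n = k + s.length) :
    ((PySem.List.enumerate s k).foldl
      (fun (st : Option Int × List Int) iv =>
        if some iv.2 ≠ st.1 then (some iv.2, st.2 ++ [n - iv.1]) else st)
      (prev, acc)).2 = acc ++ scanGo s prev := by
  induction s generalizing k prev acc with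
  | nil => simp [PySem.List.enumerate_nil, scanGo]
  | cons v t ih =>
    rw [PySem.List.enumerate_cons, List.foldl_cons]
    have hn' : n = (k + 1) + (t.length : Int) := by
      simp only [List.length_cons] at hn; push_cast at hn ⊢; omega
    by_cases hv : some v = prev
    · rw [if_neg (by simp [hv]), ih (k + 1) prev acc hn']
      simp [scanGo, hv]
    · rw [if_pos hv, ih (k + 1) (some v) (acc ++ [n - k]) hn']
      have hnk : n - k = ((v :: t).length : Int) := by
        simp only [List.length_cons] at hn ⊢; push_cast at hn ⊢; omega
      simp [scanGo, hv, hnk]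

-- shifting every rope by the same amount does not change A's loop output
theorem go_map_sub (l : List Int) (c : Int) :
    cut_the_ropes_go (l.map (fun x => x - c)) = cut_the_ropes_go l := by
  cases l with
  | nil => rfl
  | cons r rs =>
    simp only [List.map_cons]
    rw [cut_the_ropes_go, cut_the_ropes_go]
    have harg :
        ((((r - c) :: rs.map (fun x => x - c)).filter (fun x => decide (r - c < x))).map
            (fun x => x - (r - c)))
          = (((r :: rs).filter (fun x => decide (r < x))).map (fun x => x - r)) := by
      simp only [List.filter_cons, decide_eq_true_eq, lt_irrefl, if_false]
      rw [List.filter_map, List.map_map]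
      have h1 : ((fun x => decide (r - c < x)) ∘ (fun x => x - c)) = (fun x => decide (r < x)) := by
        funext x; simp only [Function.comp_apply, decide_eq_decide]; omega
      have h2 : ((fun x => x - (r - c)) ∘ (fun x => x - c)) = (fun x => x - r) := by
        funext x; simp only [Function.comp_apply]; ring
      rw [h1, h2]
    simp only [List.length_cons, List.length_map]
    rw [harg]

-- main correspondence on a sorted list, below its minimum v
theorem scanGo_eq_go (t : List Int) (v : Int) (h : (v :: t).Pairwise (· ≤ ·)) :
    scanGo t (some v) = cut_the_ropes_go (t.filter (fun x => decide (v < x))) := by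
  induction t generalizing v with
  | nil => simp [scanGo, cut_the_ropes_go]
  | cons w t' ih =>
    have hvw : v ≤ w := (List.pairwise_cons.mp h).1 w (by simp)
    have hwt : (w :: t').Pairwise (· ≤ ·) := (List.pairwise_cons.mp h).2
    by_cases hev : w = v
    · subst hev
      have hvt : (w :: t').Pairwise (· ≤ ·) := hwt
      rw [scanGo]
      simp only [ne_eq, not_true_eq_false, if_false, List.filter_cons,
        decide_eq_true_eq, lt_irrefl, if_false]
      exact ih w hvt
    · have hlt : v < w := lt_of_le_of_ne hvw (fun he => hev he.symm)
      rw [scanGo]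
      simp only [ne_eq, Option.some.injEq, hev, not_false_eq_true, if_true]
      have hall : t'.filter (fun x => decide (v < x)) = t' := by
        apply List.filter_eq_self.mpr
        intro x hx
        have hwx : w ≤ x := (List.pairwise_cons.mp hwt).1 x hx
        simp; omega
      have hfil : (w :: t').filter (fun x => decide (v < x)) = w :: t' := by
        simp [hlt, hall]
      rw [hfil, cut_the_ropes_go]
      congr 1
      simp only [List.filter_cons, decide_eq_true_eq, lt_irrefl, if_false]
      rw [go_map_sub]
      exact ih w hwt

theorem go_eq_scanGo (s : List Int) (h : s.Pairwise (· ≤ ·)) :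
    cut_the_ropes_go s = scanGo s none := by
  cases s with
  | nil => simp [scanGo, cut_the_ropes_go]
  | cons v t =>
    rw [cut_the_ropes_go, scanGo]
    simp only [ne_eq, reduceCtorEq, not_false_eq_true, if_true]
    congr 1
    simp only [List.filter_cons, decide_eq_true_eq, lt_irrefl, if_false]
    rw [go_map_sub]
    exact (scanGo_eq_go t v h).symm

-- ===== VERDICT (by name: the statement is the Claim_ definition above) =====
theorem cut_the_ropes_spec : Claim_equal_cut_the_ropes := by
  intro arr _
  unfold Spec_cut_the_ropes cut_the_ropes cut_the_ropes_alt
  rw [foldl_enum_eq_scanGo _ _ 0 none [] (by simp)]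
  simp only [List.nil_append]
  exact go_eq_scanGo _ (by simpa using PySem.List.sorted_pairwise arr (fun x => x))
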